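-- pv_equiv track=rewrite | github.com/minyez/mykit | mykit/vasp/incar.py | _get_para_tags_from_nproc
-- ===== SOURCE A (Python) =====
-- def _get_para_tags_from_nproc(nproc):
--     '''Get the value of parallelization related tags from number of processors.
--
--     The returned dict will include two keys, KPAR and NPAR, if ``nproc`` is not prime.
--     Their product equals ``nproc``. NPAR will be no smaller than KPAR.
--     Otherwise, i.e. ``nproc`` is prime, an empty dict will be returned.
--
--     Args:
--         nproc (int): number of processors to use
--
--     Returns:
--         dict
--     '''
--     from math import sqrt
--     assert isinstance(nproc, int)
--     assert nproc > 0
--     _paratags = {}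
--     if nproc > 1:
--         _kpar = int(sqrt(nproc))
--         while _kpar > 1:
--             if nproc%_kpar == 0:
--                 _paratags.update({"KPAR": _kpar, "NPAR": int(nproc/_kpar)})
--                 break
--             _kpar -= 1
--     return _paratags
-- ===== SOURCE B (Python) =====
-- def _get_para_tags_from_nproc(nproc):
--     '''Same KPAR/NPAR pair, found by an ascending divisor scan instead of a descending one.'''
--     from math import sqrt
--     assert isinstance(nproc, int)
--     assert nproc > 0
--     limit = int(sqrt(nproc))
--     best = None
--     for i in range(2, limit + 1):
--         if nproc % i == 0:
--             best = i
--     if best is None: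
--         return {}
--     return {"KPAR": best, "NPAR": int(nproc / best)}
-- ===== Notes on version B (the rewrite author's own statement) =====
-- stated objective: alternative
-- what changed: A scans divisors descending from int(sqrt(nproc)) with an early break; B scans ascending over range(2, limit+1) keeping the last divisor found in a running variable and renders the pair after the loop.
import Mathlib
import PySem

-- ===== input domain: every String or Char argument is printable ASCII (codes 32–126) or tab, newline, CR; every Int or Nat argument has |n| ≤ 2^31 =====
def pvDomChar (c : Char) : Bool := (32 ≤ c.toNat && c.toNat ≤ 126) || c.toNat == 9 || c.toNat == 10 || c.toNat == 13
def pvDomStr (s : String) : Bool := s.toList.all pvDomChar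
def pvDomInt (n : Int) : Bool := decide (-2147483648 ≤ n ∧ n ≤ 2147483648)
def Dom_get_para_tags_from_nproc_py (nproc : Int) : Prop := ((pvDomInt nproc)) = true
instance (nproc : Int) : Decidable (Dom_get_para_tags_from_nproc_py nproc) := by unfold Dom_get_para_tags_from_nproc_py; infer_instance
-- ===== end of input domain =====

-- B replaces A's descending scan with an early break by an ascending scan keeping the last
-- divisor found (same result, a different decomposition; no speed claim).
-- On the domain |nproc| ≤ 2^31, Python's int(sqrt(nproc)) equals Nat.sqrt (the float sqrt is
-- correctly rounded and cannot cross an integer at this magnitude) and int(nproc/k) for a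
-- positive divisor k equals exact integer division; both ports use these exact forms.

-- ===== PORT A =====
-- the while loop, recursing on _kpar (as a Nat); while _kpar > 1: …; _kpar -= 1
def pvALoop (nproc : Int) : Nat → List (String × Int)
  | 0 => []
  | 1 => []
  | (k+2) => if nproc % ((k : Int) + 2) = 0 then
      [("KPAR", (k : Int) + 2), ("NPAR", nproc / ((k : Int) + 2))]
    else pvALoop nproc (k+1)

def get_para_tags_from_nproc_py (nproc : Int) : List (String × Int) :=
  if nproc > 1 then pvALoop nproc nproc.toNat.sqrt else []

-- ===== PORT B =====
-- ascending for-loop over range(2, limit+1) keeping the last divisor seen in `best`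
def pvBBest (nproc limit : Int) : Option Int :=
  (PySem.List.pyRange 2 (limit + 1) 1).foldl
    (fun best i => if nproc % i = 0 then some i else best) none

def get_para_tags_from_nproc_py_alt (nproc : Int) : List (String × Int) :=
  let limit : Int := (nproc.toNat.sqrt : Int)
  match pvBBest nproc limit with
  | none => []
  | some b => [("KPAR", b), ("NPAR", nproc / b)]

-- ===== PRECONDITION & SPEC =====
-- A asserts nproc > 0 (AssertionError otherwise); exactly those inputs are excluded.
def Pre_get_para_tags_from_nproc_py (nproc : Int) : Prop := 0 < nproc
instance (nproc : Int) : Decidable (Pre_get_para_tags_from_nproc_py nproc) := by unfold Pre_get_para_tags_from_nproc_py; infer_instance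
def pvWitness_get_para_tags_from_nproc_py : Int := 12

def Spec_get_para_tags_from_nproc_py (nproc : Int) (out : List (String × Int)) : Prop := out = get_para_tags_from_nproc_py_alt nproc
instance (nproc : Int) (out : List (String × Int)) : Decidable (Spec_get_para_tags_from_nproc_py nproc out) := by unfold Spec_get_para_tags_from_nproc_py; infer_instance

-- ===== CLAIM (what is proved, stated in full; the proofs are below) =====
def Claim_equal_get_para_tags_from_nproc_py : Prop := ∀ (nproc : Int), Dom_get_para_tags_from_nproc_py nproc → Pre_get_para_tags_from_nproc_py nproc → Spec_get_para_tags_from_nproc_py nproc (get_para_tags_from_nproc_py nproc)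

-- ===== LEMMAS AND PROOFS =====

-- A's descending first-hit scan from k equals rendering the last divisor of B's ascending
-- fold over range(2, k+1) (the largest divisor in [2,k] either way).
theorem pvALoop_eq_best (nproc : Int) (k : Nat) :
    pvALoop nproc k = (match pvBBest nproc (k : Int) with
      | none => []
      | some b => [("KPAR", b), ("NPAR", nproc / b)]) := by
  induction k with
  | zero => simp [pvALoop, pvBBest, PySem.List.pyRange_one_eq_nil]
  | succ k ih =>
    match k with
    | 0 => simp [pvALoop, pvBBest, PySem.List.pyRange_one_eq_nil]
    | k+1 =>
      have hsplit : PySem.List.pyRange 2 (((k : Int) + 2) + 1) 1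
          = PySem.List.pyRange 2 ((k : Int) + 2) 1 ++ [(k : Int) + 2] :=
        PySem.List.pyRange_one_succ_right (by omega)
      have hcast : ((k + 2 : Nat) : Int) = (k : Int) + 2 := by push_cast; ring
      rw [pvALoop]
      unfold pvBBest
      rw [hcast, hsplit, List.foldl_append]
      simp only [List.foldl]
      by_cases h : nproc % ((k : Int) + 2) = 0
      · simp [h]
      · simp only [if_neg h]
        have := ih
        unfold pvBBest at this
        have hcast1 : ((k + 1 : Nat) : Int) = (k : Int) + 1 := by push_cast; ring
        rw [hcast1] at this
        exact this

theorem get_para_tags_from_nproc_py_spec : Claim_equal_get_para_tags_from_nproc_py := by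
  intro nproc _ hpre
  show _ = _
  unfold get_para_tags_from_nproc_py get_para_tags_from_nproc_py_alt
  by_cases h : nproc > 1
  · simp only [if_pos h]
    exact pvALoop_eq_best nproc nproc.toNat.sqrt
  · -- nproc = 1: sqrt 1 = 1, range(2, 2) is empty, both sides []
    have h1 : nproc = 1 := by unfold Pre_get_para_tags_from_nproc_py at hpre; omega
    subst h1
    decide
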